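-- pv_equiv track=rewrite | github.com/JeremyKalfus/AutoMath | artifacts/powers-of-two-pairs-22/search_near_ap.py | best_local_k_swap
-- ===== SOURCE A (Python) =====
-- from itertools import combinations
--
-- WINDOW = tuple(range(-40, 71))
--
-- POWERS = {1 << k for k in range(10)}
--
-- def edge_count(values):
--     values = tuple(sorted(values))
--     total = 0
--     for x, y in combinations(values, 2):
--         if x + y in POWERS:
--             total += 1
--     return total
--
-- def best_local_k_swap(base, k):
--     base = tuple(sorted(base))
--     base_set = set(base)
--     outside = tuple(v for v in WINDOW if v not in base_set)
--     best = (edge_count(base), base)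
--     for removed in combinations(base, k):
--         kept = tuple(v for v in base if v not in removed)
--         for added in combinations(outside, k):
--             cand = tuple(sorted(kept + added))
--             score = edge_count(cand)
--             if score > best[0]:
--                 best = (score, cand)
--     return best
-- ===== SOURCE B (Python) =====
-- from itertools import combinations
--
-- WINDOW = tuple(range(-40, 71))
--
-- POWERS = {1 << k for k in range(10)}
--
-- def _pair_score(xs):
--     # pairs summing to a power of two, order-independent head-by-head count
--     total = 0
--     rest = list(xs)
--     while rest:
--         x = rest.pop(0)
--         for y in rest:
--             if x + y in POWERS:
--                 total += 1
--     return total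
--
-- def best_local_k_swap(base, k):
--     base = tuple(sorted(base))
--     base_set = set(base)
--     outside = tuple(v for v in WINDOW if v not in base_set)
--     best_score = _pair_score(base)
--     best_tuple = base
--     for removed in combinations(base, k):
--         removed_set = set(removed)
--         kept = tuple(v for v in base if v not in removed_set)
--         kept_score = _pair_score(kept)
--         for added in combinations(outside, k):
--             score = kept_score + _pair_score(added)
--             for v in added:
--                 for x in kept:
--                     if x + v in POWERS:
--                         score += 1
--             if score > best_score:
--                 best_score = score
--                 best_tuple = tuple(sorted(kept + added))
--     return (best_score, best_tuple)
-- ===== Notes on version B (the rewrite author's own statement) =====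
-- stated objective: alternative
-- what changed: Instead of sorting each candidate and rescanning all of its pairs, B computes each candidate's score by delta: a per-removal kept-pairs count computed once, plus the added-added pairs and the kept-added cross pairs for each added combination (less work per candidate; speed not claimed since a timing run could not measure it).
import Mathlib
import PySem

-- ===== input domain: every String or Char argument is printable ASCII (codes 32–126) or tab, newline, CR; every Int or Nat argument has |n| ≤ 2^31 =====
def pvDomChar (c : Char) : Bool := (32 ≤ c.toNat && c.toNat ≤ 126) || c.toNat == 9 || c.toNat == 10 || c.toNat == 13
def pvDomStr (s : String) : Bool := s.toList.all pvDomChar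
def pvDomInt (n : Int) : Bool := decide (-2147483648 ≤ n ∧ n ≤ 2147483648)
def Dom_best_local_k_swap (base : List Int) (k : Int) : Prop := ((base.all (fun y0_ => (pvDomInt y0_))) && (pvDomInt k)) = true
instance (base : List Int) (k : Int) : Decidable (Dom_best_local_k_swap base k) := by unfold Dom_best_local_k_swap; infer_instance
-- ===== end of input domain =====

-- B replaces A's per-candidate full rescan (sort + scan of all pairs of the candidate) by delta
-- scoring: kept-pairs counted once per removal, plus added-pairs and kept-added cross pairs.

-- shared module constants: WINDOW = tuple(range(-40, 71)), POWERS = {1 << k for k in range(10)}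
def pvWindow : List Int := PySem.List.pyRange (-40) 71 1
def pvPowers : PySem.Set Int := PySem.Set.ofList ((List.range 10).map (fun k => (2 : Int) ^ k))

-- itertools.combinations(l, k) in Python's (lexicographic-by-index) order
def pvCombos (k : Nat) (l : List Int) : List (List Int) :=
  match k, l with
  | 0, _ => [[]]
  | _ + 1, [] => []
  | kk + 1, x :: xs => (pvCombos kk xs).map (fun c => x :: c) ++ pvCombos (kk + 1) xs

-- ===== PORT A =====
def edge_count (values : List Int) : Int :=
  let v := PySem.List.sorted values (fun x => x) false
  (pvCombos 2 v).foldl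
    (fun total p =>
      match p with
      | [x, y] => if pvPowers.contains (x + y) then total + 1 else total
      | _ => total) 0

def best_local_k_swap (base : List Int) (k : Int) : Int × List Int :=
  let b := PySem.List.sorted base (fun x => x) false
  let baseSet := PySem.Set.ofList b
  let outside := pvWindow.filter (fun v => !(baseSet.contains v))
  let best := (edge_count b, b)
  (pvCombos k.toNat b).foldl
    (fun best removed =>
      let kept := b.filter (fun v => !(removed.contains v))
      (pvCombos k.toNat outside).foldl
        (fun best added =>
          let cand := PySem.List.sorted (kept ++ added) (fun x => x) false
          let score := edge_count cand
          if best.1 < score then (score, cand) else best)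
        best)
    best

-- ===== PORT B =====
-- _pair_score: head-by-head count (while rest: x = rest.pop(0); count partners of x in rest)
def pairScore : List Int → Int
  | [] => 0
  | x :: rest =>
      rest.foldl (fun t y => if pvPowers.contains (x + y) then t + 1 else t) 0 + pairScore rest

def best_local_k_swap_alt (base : List Int) (k : Int) : Int × List Int :=
  let b := PySem.List.sorted base (fun x => x) false
  let baseSet := PySem.Set.ofList b
  let outside := pvWindow.filter (fun v => !(baseSet.contains v))
  (pvCombos k.toNat b).foldl
    (fun best removed =>
      let removedSet := PySem.Set.ofList removed
      let kept := b.filter (fun v => !(removedSet.contains v))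
      let keptScore := pairScore kept
      (pvCombos k.toNat outside).foldl
        (fun best added =>
          let score0 := keptScore + pairScore added
          let score := added.foldl
            (fun s v => kept.foldl (fun s x => if pvPowers.contains (x + v) then s + 1 else s) s)
            score0
          if best.1 < score then (score, PySem.List.sorted (kept ++ added) (fun x => x) false)
          else best)
        best)
    (pairScore b, b)

-- ===== PRECONDITION & SPEC =====
-- A raises ValueError when k < 0 (combinations requires r ≥ 0); Pre_ excludes exactly that.
def Pre_best_local_k_swap (base : List Int) (k : Int) : Prop := 0 ≤ k
instance (base : List Int) (k : Int) : Decidable (Pre_best_local_k_swap base k) := by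
  unfold Pre_best_local_k_swap; infer_instance
def pvWitness_best_local_k_swap : List Int × Int := ([1, 3, 5], 1)

def Spec_best_local_k_swap (base : List Int) (k : Int) (out : Int × List Int) : Prop :=
  out = best_local_k_swap_alt base k
instance (base : List Int) (k : Int) (out : Int × List Int) :
    Decidable (Spec_best_local_k_swap base k out) := by
  unfold Spec_best_local_k_swap; infer_instance

-- ===== CLAIM (what is proved, stated in full; the proofs are below) =====
def Claim_equal_best_local_k_swap : Prop := ∀ (base : List Int) (k : Int),
  Dom_best_local_k_swap base k → Pre_best_local_k_swap base k →
  Spec_best_local_k_swap base k (best_local_k_swap base k)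

-- ===== LEMMAS AND PROOFS =====

-- counting partners of x in l
def pvCnt (x : Int) (l : List Int) : Int :=
  (l.countP (fun y => pvPowers.contains (x + y)) : Int)

theorem foldl_ext {α β : Type} (f g : β → α → β) (h : ∀ b a, f b a = g b a) :
    ∀ (l : List α) (b : β), l.foldl f b = l.foldl g b := by
  intro l
  induction l with
  | nil => intro b; rfl
  | cons a l ih => intro b; simp only [List.foldl_cons, h, ih]

theorem set_contains_ofList (l : List Int) (v : Int) :
    (PySem.Set.ofList l).contains v = l.contains v := by
  rw [Bool.eq_iff_iff]
  simp [PySem.Set.mem_ofList]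

theorem pairScore_cons (x : Int) (rest : List Int) :
    pairScore (x :: rest) = pvCnt x rest + pairScore rest := by
  show rest.foldl (fun t y => if pvPowers.contains (x + y) then t + 1 else t) 0
      + pairScore rest = _
  rw [PySem.List.foldl_if_add_one]
  unfold pvCnt
  ring

theorem pairScore_perm {l l' : List Int} (h : l.Perm l') : pairScore l = pairScore l' := by
  induction h with
  | nil => rfl
  | cons x h ih =>
      rename_i l₁ l₂
      rw [pairScore_cons, pairScore_cons, ih, pvCnt, pvCnt, h.countP_eq]
  | swap x y l =>
      rw [pairScore_cons, pairScore_cons, pairScore_cons, pairScore_cons, pvCnt, pvCnt,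
        pvCnt, pvCnt]
      simp only [List.countP_cons]
      have hxy : (x + y) = (y + x) := by ring
      rw [hxy]
      push_cast
      split <;> omega
  | trans _ _ ih₁ ih₂ => rw [ih₁, ih₂]

theorem pvCombos_one (l : List Int) : pvCombos 1 l = l.map (fun x => [x]) := by
  induction l with
  | nil => rfl
  | cons x xs ih => simp [pvCombos, ih]

theorem edge_fold_count (x : Int) (l : List Int) (a : Int) :
    (l.map (fun y => [x, y])).foldl
      (fun total p =>
        match p with
        | [u, v] => if pvPowers.contains (u + v) then total + 1 else total
        | _ => total) a = a + pvCnt x l := by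
  rw [List.foldl_map]
  simp only []
  rw [pvCnt, PySem.List.foldl_if_add_one]

theorem combos2_foldl (l : List Int) (a : Int) :
    (pvCombos 2 l).foldl
      (fun total p =>
        match p with
        | [u, v] => if pvPowers.contains (u + v) then total + 1 else total
        | _ => total) a = a + pairScore l := by
  induction l generalizing a with
  | nil => simp [pvCombos, pairScore]
  | cons x xs ih =>
      show ((pvCombos 1 xs).map (fun c => x :: c) ++ pvCombos 2 xs).foldl _ a = _
      rw [List.foldl_append, pvCombos_one, List.map_map]
      have : ((fun c => x :: c) ∘ fun y => [y]) = fun y => [x, y] := rfl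
      rw [this, edge_fold_count, ih, pairScore_cons, pvCnt]
      ring

theorem edge_count_eq_pairScore (values : List Int) : edge_count values = pairScore values := by
  unfold edge_count
  rw [combos2_foldl]
  rw [pairScore_perm (PySem.List.sorted_perm values (fun x => x) false)]
  ring

theorem pairScore_append (l₁ l₂ : List Int) :
    pairScore (l₁ ++ l₂) = pairScore l₁ + (l₁.map (fun x => pvCnt x l₂)).sum + pairScore l₂ := by
  induction l₁ with
  | nil => simp [pairScore]
  | cons x xs ih =>
      rw [List.cons_append, pairScore_cons, pairScore_cons, ih, pvCnt, List.countP_append]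
      simp only [List.map_cons, List.sum_cons, pvCnt]
      push_cast
      ring

theorem sum_swap (l₁ l₂ : List Int) (f : Int → Int → Int) :
    (l₁.map (fun x => (l₂.map (f x)).sum)).sum
      = (l₂.map (fun v => (l₁.map (fun x => f x v)).sum)).sum := by
  induction l₁ with
  | nil => simp
  | cons x xs ih =>
      simp only [List.map_cons, List.sum_cons]
      rw [ih, ← PySem.List.sum_map_add_int]

theorem cnt_fubini (l₁ l₂ : List Int) :
    (l₁.map (fun x => pvCnt x l₂)).sum
      = (l₂.map (fun v => (l₁.countP (fun x => pvPowers.contains (x + v)) : Int))).sum := by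
  have e1 : (l₁.map (fun x => pvCnt x l₂)).sum
      = (l₁.map (fun x =>
          (l₂.map (fun v => if pvPowers.contains (x + v) then (1 : Int) else 0)).sum)).sum := by
    refine congrArg List.sum (List.map_congr_left (fun x _ => ?_))
    rw [PySem.List.sum_map_ite_one_zero]
    rfl
  have e2 : (l₂.map (fun v => (l₁.countP (fun x => pvPowers.contains (x + v)) : Int))).sum
      = (l₂.map (fun v =>
          (l₁.map (fun x => if pvPowers.contains (x + v) then (1 : Int) else 0)).sum)).sum := by
    refine congrArg List.sum (List.map_congr_left (fun v _ => ?_))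
    rw [PySem.List.sum_map_ite_one_zero]
  rw [e1, e2, sum_swap]

theorem cross_foldl (kept added : List Int) (s : Int) :
    added.foldl
      (fun s v => kept.foldl (fun s x => if pvPowers.contains (x + v) then s + 1 else s) s) s
      = s + (added.map (fun v => (kept.countP (fun x => pvPowers.contains (x + v)) : Int))).sum := by
  induction added generalizing s with
  | nil => simp
  | cons v vs ih =>
      simp only [List.foldl_cons, List.map_cons, List.sum_cons]
      rw [PySem.List.foldl_if_add_one, ih]
      ring

theorem score_eq (kept added : List Int) :
    pairScore (PySem.List.sorted (kept ++ added) (fun x => x) false)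
      = added.foldl
          (fun s v => kept.foldl (fun s x => if pvPowers.contains (x + v) then s + 1 else s) s)
          (pairScore kept + pairScore added) := by
  rw [pairScore_perm (PySem.List.sorted_perm (kept ++ added) (fun x => x) false),
    pairScore_append, cnt_fubini, cross_foldl]
  ring

-- ===== VERDICT (by name: the statement is the Claim_ definition above) =====
theorem best_local_k_swap_spec : Claim_equal_best_local_k_swap := by
  intro base k _ _
  unfold Spec_best_local_k_swap best_local_k_swap best_local_k_swap_alt
  simp only [edge_count_eq_pairScore, set_contains_ofList]
  apply foldl_ext
  intro best removed
  apply foldl_ext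
  intro best' added
  rw [score_eq]
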